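-- pv_equiv track=rewrite | github.com/linnil1/KIR_graph | case_repeat.py | addPosition
-- ===== SOURCE A (Python) =====
-- gene = "KIR"
--
-- def addPosition(seq_list):
--     pos = 0
--     seqs = []
--     for seq in seq_list:
--         seqs.append({
--             'id': f"{gene}*BB-{pos:05d}",
--             'seq': seq,
--         })
--         pos += len(seq)
--     return seqs
-- ===== SOURCE B (Python) =====
-- gene = "KIR"
--
-- def addPosition(seq_list):
--     offsets = [0]
--     for s in seq_list:
--         offsets.append(offsets[-1] + len(s))
--     return [{'id': f"{gene}*BB-{p:05d}", 'seq': s}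
--             for p, s in zip(offsets, seq_list)]
-- ===== Notes on version B (the rewrite author's own statement) =====
-- stated objective: alternative
-- what changed: Replaces the in-loop mutable position counter with a separately built prefix-offset table followed by a single zip comprehension that maps each (offset, seq) pair to its record.
import Mathlib
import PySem

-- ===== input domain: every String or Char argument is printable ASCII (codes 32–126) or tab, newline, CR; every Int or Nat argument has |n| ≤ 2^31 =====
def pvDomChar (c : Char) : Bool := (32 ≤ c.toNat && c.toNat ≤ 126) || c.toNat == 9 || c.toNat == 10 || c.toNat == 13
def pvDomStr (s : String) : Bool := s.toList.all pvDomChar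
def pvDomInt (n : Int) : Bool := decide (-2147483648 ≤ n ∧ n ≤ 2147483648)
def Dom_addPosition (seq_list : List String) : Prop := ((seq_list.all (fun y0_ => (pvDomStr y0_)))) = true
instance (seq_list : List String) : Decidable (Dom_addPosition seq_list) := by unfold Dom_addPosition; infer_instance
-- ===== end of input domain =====

-- B replaces A's running mutable counter with a prefix-offset table plus one zip/map pass ("alternative" decomposition, same cost).

-- ===== PORT A =====
-- f"KIR*BB-{pos:05d}" for a nonnegative pos: decimal digits zero-padded to width 5 (exact for pos ≥ 0, which holds here)
def fmtId (pos : Int) : String :=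
  let s := PySem.Int.toStr pos
  "KIR*BB-" ++ String.mk (List.replicate (5 - s.toList.length) '0') ++ s

def addPosition (seq_list : List String) : List (List (String × String)) :=
  (seq_list.foldl
    (fun (st : Int × List (List (String × String))) seq =>
      (st.1 + PySem.Str.len seq, st.2 ++ [[("id", fmtId st.1), ("seq", seq)]]))
    (0, [])).2

-- ===== PORT B =====
def addPosition_alt (seq_list : List String) : List (List (String × String)) :=
  let offsets := seq_list.foldl
    (fun (offs : List Int) s => offs ++ [offs.getLastD 0 + PySem.Str.len s]) [0]
  (offsets.zip seq_list).map (fun ps => [("id", fmtId ps.1), ("seq", ps.2)])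

-- ===== PRECONDITION & SPEC =====
def Spec_addPosition (seq_list : List String) (out : List (List (String × String))) : Prop := out = addPosition_alt seq_list
instance (seq_list : List String) (out : List (List (String × String))) : Decidable (Spec_addPosition seq_list out) := by unfold Spec_addPosition; infer_instance

-- ===== CLAIM (what is proved, stated in full; the proofs are below) =====
def Claim_equal_addPosition : Prop := ∀ (seq_list : List String), Dom_addPosition seq_list → Spec_addPosition seq_list (addPosition seq_list)

-- ===== LEMMAS AND PROOFS =====

-- offsets strictly after position p for the remaining list
def tailOff : List String → Int → List Int
  | [], _ => []
  | s :: r, p => (p + PySem.Str.len s) :: tailOff r (p + PySem.Str.len s)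

-- B's offsets loop, generalized: starting from any list ending in p it appends tailOff
lemma offs_fold (l : List String) : ∀ (init : List Int) (p : Int),
    l.foldl (fun (offs : List Int) s => offs ++ [offs.getLastD 0 + PySem.Str.len s]) (init ++ [p])
      = init ++ [p] ++ tailOff l p := by
  induction l with
  | nil => intro init p; simp [tailOff]
  | cons s r ih =>
    intro init p
    have h : (init ++ [p]).getLastD 0 = p := by simp
    simp only [List.foldl_cons, h, tailOff]
    have := ih (init ++ [p]) (p + PySem.Str.len s)
    simp only [List.append_assoc] at *
    simpa using this

-- A's loop, generalized: its accumulated output equals acc ++ the zip/map of (p :: tailOff l p) with l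
lemma foldA (l : List String) : ∀ (p : Int) (acc : List (List (String × String))),
    (l.foldl
      (fun (st : Int × List (List (String × String))) seq =>
        (st.1 + PySem.Str.len seq, st.2 ++ [[("id", fmtId st.1), ("seq", seq)]]))
      (p, acc)).2
    = acc ++ (((p :: tailOff l p).zip l).map (fun ps => [("id", fmtId ps.1), ("seq", ps.2)])) := by
  induction l with
  | nil => intro p acc; simp
  | cons s r ih =>
    intro p acc
    simp only [List.foldl_cons, tailOff, List.zip_cons_cons, List.map_cons]
    rw [ih]
    simp

-- ===== VERDICT (by name: the statement is the Claim_ definition above) =====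
theorem addPosition_spec : Claim_equal_addPosition := by
  intro seq_list _
  show addPosition seq_list = addPosition_alt seq_list
  unfold addPosition addPosition_alt
  rw [foldA]
  have := offs_fold seq_list [] 0
  simp only [List.nil_append] at this
  rw [this]
  simp
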